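-- pv_equiv track=rewrite | github.com/hyowonsong/Algorithm1 | 프로그래머스/2/150368. 이모티콘 할인행사/이모티콘 할인행사.py | solution
-- ===== SOURCE A (Python) =====
-- def dfs(depth, current, result, discount_rates, m):
--     if depth == m:  # 모든 이모티콘에 대해 할인율을 설정했으면 결과에 추가
--         result.append(current[:])
--         return
--     for rate in discount_rates:
--         current.append(rate)
--         dfs(depth + 1, current, result, discount_rates, m)
--         current.pop()  # 백트래킹
--
-- def solution(users, emoticons):
--     discount_rates = [10, 20, 30, 40]
--     m = len(emoticons)
--     all_discount = []
--
--     # DFS로 할인율 조합 생성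
--     dfs(0, [], all_discount, discount_rates, m)
--
--     max_plus_users = 0  # 최대 플러스 서비스 가입자 수
--     max_sales = 0       # 최대 매출액
--
--     # 각 할인율 조합에 대해 결과 계산
--     for discounts in all_discount:
--         plus_users = 0
--         sales = 0
--
--         for user_rate, user_price in users:  # 각 사용자 처리
--             total_cost = 0
--
--             # 사용자가 구매 가능한 이모티콘 계산
--             for i in range(m):
--                 if discounts[i] >= user_rate:  # 할인율 조건 만족
--                     discounted_price = emoticons[i] * (100 - discounts[i]) // 100
--                     total_cost += discounted_price
--
--             # 기준에 따라 플러스 서비스 가입 또는 매출 합산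
--             if total_cost >= user_price:
--                 plus_users += 1
--             else:
--                 sales += total_cost
--
--         # 목표 1: 플러스 서비스 가입자 수 최대화, 목표 2: 매출액 최대화
--         if plus_users > max_plus_users or (plus_users == max_plus_users and sales > max_sales):
--             max_plus_users = plus_users
--             max_sales = sales
--
--     return [max_plus_users, max_sales]
-- ===== SOURCE B (Python) =====
-- def solution(users, emoticons):
--     combos = [()]
--     for _ in emoticons:
--         combos = [c + (r,) for c in combos for r in (10, 20, 30, 40)]
--     best_users, best_sales = 0, 0
--     for discounts in combos:
--         joined = 0
--         sales = 0
--         for user_rate, user_price in users: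
--             cost = sum(p * (100 - d) // 100
--                        for d, p in zip(discounts, emoticons) if d >= user_rate)
--             if cost >= user_price:
--                 joined += 1
--             else:
--                 sales += cost
--         if (joined, sales) > (best_users, best_sales):
--             best_users, best_sales = joined, sales
--     return [best_users, best_sales]
-- ===== Notes on version B (the rewrite author's own statement) =====
-- stated objective: idiomatic
-- what changed: Replaces the recursive backtracking dfs that pre-builds the combination list with an iterative breadth-wise product build, and replaces the indexed range(m) inner loop with a zip-based generator sum, updating the best via tuple comparison.
import Mathlib
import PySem

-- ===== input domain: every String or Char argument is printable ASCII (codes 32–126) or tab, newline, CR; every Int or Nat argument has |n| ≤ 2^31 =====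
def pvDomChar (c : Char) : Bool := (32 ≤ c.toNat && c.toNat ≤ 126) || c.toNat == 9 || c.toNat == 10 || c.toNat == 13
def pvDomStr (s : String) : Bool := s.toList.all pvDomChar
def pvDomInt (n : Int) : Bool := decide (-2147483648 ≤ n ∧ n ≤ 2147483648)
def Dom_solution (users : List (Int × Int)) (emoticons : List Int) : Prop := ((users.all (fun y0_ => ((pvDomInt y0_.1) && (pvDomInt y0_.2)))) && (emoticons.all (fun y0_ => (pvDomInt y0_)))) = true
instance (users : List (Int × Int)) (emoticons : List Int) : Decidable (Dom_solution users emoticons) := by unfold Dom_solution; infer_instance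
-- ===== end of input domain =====

-- B replaces A's recursive backtracking dfs (which pre-builds the combination list) by an
-- iterative breadth-wise product build, and the indexed range(m) cost loop by a zip/filter sum;
-- objective: a more idiomatic decomposition, same asymptotic cost.


-- ===== PORT A =====
-- dfs(depth, current, result, …): result collects, in order, every combination; ported as a
-- function returning the list of combinations appended by the call (fuel = m - depth).
def dfsA (rates : List Int) : Nat → List Int → List (List Int)
  | 0, current => [current]
  | n + 1, current => rates.foldl (fun acc r => acc ++ dfsA rates n (current ++ [r])) []

def solution (users : List (Int × Int)) (emoticons : List Int) : List Int :=
  let discountRates : List Int := [10, 20, 30, 40]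
  let m := emoticons.length
  let allDiscount := dfsA discountRates m []
  let best := allDiscount.foldl (fun (best : Int × Int) discounts =>
    let ps := users.foldl (fun (st : Int × Int) user =>
      -- for i in range(m): discounts[i], emoticons[i] — i is always in range (every
      -- combination has length m), so pyGetD's default is never consulted
      let totalCost := (PySem.List.pyRange 0 (m : Int) 1).foldl (fun tc i =>
        if PySem.List.pyGetD discounts i 0 ≥ user.1 then
          tc + PySem.Int.floordiv (PySem.List.pyGetD emoticons i 0 * (100 - PySem.List.pyGetD discounts i 0)) 100
        else tc) 0
      if totalCost ≥ user.2 then (st.1 + 1, st.2) else (st.1, st.2 + totalCost)) (0, 0)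
    if ps.1 > best.1 ∨ (ps.1 = best.1 ∧ ps.2 > best.2) then ps else best) (0, 0)
  [best.1, best.2]

-- ===== PORT B =====
def solution_alt (users : List (Int × Int)) (emoticons : List Int) : List Int :=
  let combos := emoticons.foldl
    (fun combos _ => combos.flatMap (fun c => [(10 : Int), 20, 30, 40].map (fun r => c ++ [r])))
    [([] : List Int)]
  let best := combos.foldl (fun (best : Int × Int) discounts =>
    let js := users.foldl (fun (st : Int × Int) user =>
      let cost := ((discounts.zip emoticons).filter (fun dp => dp.1 ≥ user.1)).foldl
        (fun a dp => a + PySem.Int.floordiv (dp.2 * (100 - dp.1)) 100) 0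
      if cost ≥ user.2 then (st.1 + 1, st.2) else (st.1, st.2 + cost)) (0, 0)
    -- (joined, sales) > (best_users, best_sales): Python tuple comparison, lexicographic
    if js.1 > best.1 ∨ (js.1 = best.1 ∧ js.2 > best.2) then js else best) (0, 0)
  [best.1, best.2]

-- ===== PRECONDITION & SPEC =====
def Spec_solution (users : List (Int × Int)) (emoticons : List Int) (out : List Int) : Prop := out = solution_alt users emoticons
instance (users : List (Int × Int)) (emoticons : List Int) (out : List Int) : Decidable (Spec_solution users emoticons out) := by unfold Spec_solution; infer_instance

-- ===== CLAIM (what is proved, stated in full; the proofs are below) =====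
def Claim_equal_solution : Prop := ∀ (users : List (Int × Int)) (emoticons : List Int), Dom_solution users emoticons → Spec_solution users emoticons (solution users emoticons)

-- ===== LEMMAS AND PROOFS =====

-- one breadth-wise extension step of B's product build
def extC (cs : List (List Int)) : List (List Int) :=
  cs.flatMap (fun c => [(10 : Int), 20, 30, 40].map (fun r => c ++ [r]))

theorem dfsA_succ (n : Nat) (cur : List Int) :
    dfsA [10, 20, 30, 40] (n + 1) cur = extC (dfsA [10, 20, 30, 40] n cur) := by
  induction n generalizing cur with
  | zero => rfl
  | succ n ih =>
    show ([(10:Int),20,30,40]).foldl (fun acc r => acc ++ dfsA [10,20,30,40] (n+1) (cur ++ [r])) []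
        = extC (([(10:Int),20,30,40]).foldl (fun acc r => acc ++ dfsA [10,20,30,40] n (cur ++ [r])) [])
    rw [PySem.List.foldl_append_eq_flatMap, PySem.List.foldl_append_eq_flatMap]
    simp only [List.nil_append, extC, List.flatMap_assoc]
    exact List.flatMap_congr (fun r _ => by rw [ih]; rfl)

theorem foldl_extC_dfs (es : List Int) (n : Nat) :
    es.foldl (fun a _ => extC a) (dfsA [10, 20, 30, 40] n []) =
      dfsA [10, 20, 30, 40] (es.length + n) [] := by
  induction es generalizing n with
  | nil => simp
  | cons e es ih =>
    simp only [List.foldl_cons, ← dfsA_succ, List.length_cons]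
    rw [ih (n + 1)]
    congr 1
    omega

theorem length_mem_dfsA (n : Nat) (cur c : List Int)
    (h : c ∈ dfsA [10, 20, 30, 40] n cur) : c.length = n + cur.length := by
  induction n generalizing cur c with
  | zero =>
    simp only [dfsA, List.mem_singleton] at h
    simp [h]
  | succ n ih =>
    rw [dfsA_succ] at h
    simp only [extC, List.mem_flatMap, List.mem_map] at h
    obtain ⟨c', hc', r, _, rfl⟩ := h
    have := ih cur c' hc'
    simp [this]
    omega

theorem sum_map_filter_ite (l : List (Int × Int)) (p : Int × Int → Bool) (f : Int × Int → Int) :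
    ((l.filter p).map f).sum = (l.map (fun x => if p x then f x else 0)).sum := by
  induction l with
  | nil => rfl
  | cons x l ih =>
    by_cases h : p x <;> simp [h, ih]

theorem cost_eq (d e : List Int) (hm : d.length = e.length) (ur : Int) :
    (PySem.List.pyRange 0 (e.length : Int) 1).foldl (fun tc i =>
        if PySem.List.pyGetD d i 0 ≥ ur then
          tc + PySem.Int.floordiv (PySem.List.pyGetD e i 0 * (100 - PySem.List.pyGetD d i 0)) 100
        else tc) 0
      = ((d.zip e).filter (fun dp => dp.1 ≥ ur)).foldl
          (fun a dp => a + PySem.Int.floordiv (dp.2 * (100 - dp.1)) 100) 0 := by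
  have hA := PySem.List.foldl_congr_mem (PySem.List.pyRange 0 (e.length : Int) 1)
    (fun tc i => if PySem.List.pyGetD d i 0 ≥ ur then
        tc + PySem.Int.floordiv (PySem.List.pyGetD e i 0 * (100 - PySem.List.pyGetD d i 0)) 100
      else tc)
    (fun tc i => tc + (if PySem.List.pyGetD d i 0 ≥ ur then
        PySem.Int.floordiv (PySem.List.pyGetD e i 0 * (100 - PySem.List.pyGetD d i 0)) 100
      else 0))
    0 (fun acc x _ => by dsimp only; split <;> simp)
  rw [hA, PySem.List.foldl_add, PySem.List.foldl_add, sum_map_filter_ite]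
  simp only [zero_add]
  congr 1
  apply List.ext_getElem
  · simp [PySem.List.length_pyRange_one, hm]
  · intro k hk1 hk2
    have hk : k < e.length := by
      simpa [PySem.List.length_pyRange_one] using hk1
    have hd : k < d.length := by omega
    simp [PySem.List.pyRange_one, PySem.List.pyGetD_natCast, List.getD_eq_getElem?_getD, hk, hd]

-- ===== VERDICT (by name: the statement is the Claim_ definition above) =====
theorem solution_spec : Claim_equal_solution := by
  intro users emoticons _
  unfold Spec_solution solution solution_alt
  have hcombos : emoticons.foldl
      (fun combos _ => combos.flatMap (fun c => [(10 : Int), 20, 30, 40].map (fun r => c ++ [r])))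
      [([] : List Int)]
      = dfsA [10, 20, 30, 40] emoticons.length [] := by
    have h0 := foldl_extC_dfs emoticons 0
    simpa only [extC, dfsA, Nat.add_zero] using h0
  dsimp only
  rw [hcombos]
  refine congrArg (fun p : Int × Int => [p.1, p.2]) (PySem.List.foldl_congr_mem _ _ _ _ ?_)
  intro best discounts hmem
  have hlen : discounts.length = emoticons.length := by
    simpa using length_mem_dfsA emoticons.length [] discounts hmem
  exact congrArg (fun p : Int × Int => if p.1 > best.1 ∨ (p.1 = best.1 ∧ p.2 > best.2) then p else best)
    (PySem.List.foldl_congr_mem _ _ _ _ (fun st user _ => by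
      rw [cost_eq discounts emoticons hlen user.1]))
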